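-- pv_equiv track=rewrite | github.com/somyalalwani/Secure-MAC | p2.py | PRG
-- ===== SOURCE A (Python) =====
-- def bin_to_dec(x):
--   return int( str(x),2 )
--
-- def dec_to_bin(x):
--   return bin(x)[2:]
--
-- g = 47
--
-- p = 27527
--
-- def func_h(a,b):
--     mod_exp_final = dec_to_bin(pow(g, bin_to_dec(a), p)).zfill(16)
--     hcb = 0 #hcb
--     l = len(a)
--     for i in range(l):
--         anding = int(a[i]) & int(b[i])
--         hcb =hcb^anding
--     return mod_exp_final + b,str(hcb)
--
-- def PRG(initial_seed,output_len):
--     bstring = initial_seed.zfill(32)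
--     ans=""
--     for i in range(output_len):
--         x = len(bstring)//2
--         a,b = bstring[:x] , bstring[x:]
--         bstring,ans_bit=func_h(a,b)
--         ans=ans + ans_bit
--     return ans
-- ===== SOURCE B (Python) =====
-- g = 47
--
-- p = 27527
--
-- def PRG(initial_seed, output_len):
--     # Cycle detection: the state space is finite, so instead of stepping output_len
--     # times we step until the state repeats, then tile the periodic bit pattern.
--     state = initial_seed.zfill(32)
--     seen = {}
--     bits = []
--     i = 0
--     while i < output_len and state not in seen:
--         seen[state] = i
--         x = len(state) // 2
--         a, b = state[:x], state[x:]
--         h = 0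
--         for j in range(len(a)):
--             h ^= int(a[j]) & int(b[j])
--         bits.append(str(h))
--         state = bin(pow(g, int(a, 2), p))[2:].zfill(16) + b
--         i += 1
--     if i >= output_len:
--         return "".join(bits)
--     s = seen[state]
--     rem = output_len - s
--     cycle = bits[s:]
--     L = len(cycle)
--     return "".join(bits[:s]) + "".join(cycle) * (rem // L) + "".join(cycle[:rem % L])
-- ===== Notes on version B (the rewrite author's own statement) =====
-- stated objective: faster
-- what changed: B detects when the PRG state repeats (the state space is finite) with a seen-dictionary, then stops iterating and builds the rest of the output by tiling the detected periodic bit pattern, instead of A's stepping once per output bit.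
-- outside the precondition, e.g. on PRG('7', 1): A returns '0', B returns '0'
import Mathlib
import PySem

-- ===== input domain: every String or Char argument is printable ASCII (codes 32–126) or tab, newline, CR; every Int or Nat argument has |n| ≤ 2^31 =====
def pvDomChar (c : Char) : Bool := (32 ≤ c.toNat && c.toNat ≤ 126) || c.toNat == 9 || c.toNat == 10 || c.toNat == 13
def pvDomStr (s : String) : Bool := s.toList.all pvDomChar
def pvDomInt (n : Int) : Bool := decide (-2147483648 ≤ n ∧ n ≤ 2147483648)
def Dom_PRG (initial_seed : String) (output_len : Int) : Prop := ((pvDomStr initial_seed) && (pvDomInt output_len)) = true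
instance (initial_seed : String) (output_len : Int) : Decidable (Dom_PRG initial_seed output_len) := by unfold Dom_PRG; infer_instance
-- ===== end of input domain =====

-- B stops iterating as soon as the PRG state repeats and tiles the periodic bit pattern,
-- instead of A's one round of the step function per output bit; return values agree.

-- ===== PORT A =====
-- int(c) for a single character: exact on '0'/'1' (Pre_ guarantees only those occur); Python raises elsewhere
def pvCharVal (c : Char) : Nat := if c = '1' then 1 else 0
-- int(str(x), 2): exact on nonempty strings of binary digits (guaranteed under Pre_); Python raises elsewhere
def pvBinToDec (s : List Char) : Nat := s.foldl (fun n c => 2 * n + pvCharVal c) 0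
-- bin(x)[2:] for x ≥ 0 (Python ints here are nonnegative: parses of binary digits and pow results)
def pvDecToBin (n : Nat) : List Char :=
  if n < 2 then [if n = 1 then '1' else '0']
  else pvDecToBin (n / 2) ++ [if n % 2 = 1 then '1' else '0']
-- pow(g, e, m) with m > 0: binary modular exponentiation, exactly CPython's three-argument pow
def pvPowMod (b e m : Nat) : Nat :=
  if e = 0 then 1 % m
  else
    let h := pvPowMod b (e / 2) m
    if e % 2 = 0 then h * h % m else h * h % m * b % m

-- a[i]/b[i] are in range for every call A makes (i < len(a) ≤ len(b)), so getD is exact here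
def pvFuncH (a b : List Char) : List Char × List Char :=
  let modExpFinal := PySem.Chars.zfill (pvDecToBin (pvPowMod 47 (pvBinToDec a) 27527)) 16
  let l := a.length
  let hcb := (List.range l).foldl
    (fun h i => h ^^^ (pvCharVal (a.getD i '0') &&& pvCharVal (b.getD i '0'))) 0
  (modExpFinal ++ b, (PySem.Int.toStr (hcb : Int)).toList)

def PRG (initial_seed : String) (output_len : Int) : String :=
  let bstring := PySem.Chars.zfill initial_seed.toList 32
  let r := (List.range output_len.toNat).foldl
    (fun (st : List Char × List Char) _ =>
      let x := st.1.length / 2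
      let a := st.1.take x
      let b := st.1.drop x
      let fh := pvFuncH a b
      (fh.1, st.2 ++ fh.2))
    (bstring, [])
  String.ofList r.2

-- ===== PORT B =====
-- the while loop of Source B: fuel = output_len - i; returns (bits, state, seen, i) at exit
def pvLoopB : Nat → List Char → PySem.Dict (List Char) Nat → Nat → List (List Char) →
    List (List Char) × List Char × PySem.Dict (List Char) Nat × Nat
  | 0, state, seen, i, bits => (bits, state, seen, i)
  | fuel + 1, state, seen, i, bits =>
    if (seen.get? state).isSome then (bits, state, seen, i)
    else
      let x := state.length / 2
      let a := state.take x
      let b := state.drop x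
      let h := (List.range a.length).foldl
        (fun h j => h ^^^ (pvCharVal (a.getD j '0') &&& pvCharVal (b.getD j '0'))) 0
      pvLoopB fuel (PySem.Chars.zfill (pvDecToBin (pvPowMod 47 (pvBinToDec a) 27527)) 16 ++ b)
        (seen.insert state i) (i + 1) (bits ++ [(PySem.Int.toStr (h : Int)).toList])

def PRG_alt (initial_seed : String) (output_len : Int) : String :=
  let state0 := PySem.Chars.zfill initial_seed.toList 32
  let r := pvLoopB output_len.toNat state0 PySem.Dict.empty 0 []
  let bits := r.1
  let state := r.2.1
  let seen := r.2.2.1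
  let i := r.2.2.2
  if output_len ≤ (i : Int) then String.ofList (PySem.Chars.join [] bits)
  else
    let s := (seen.get? state).getD 0
    let rem := output_len - (s : Int)
    let cycle := bits.drop s
    let L := (cycle.length : Int)
    -- cycle[:rem % L]: the slice index rem % L is ≥ 0 here (L > 0 at every reachable use), so take is exact
    String.ofList (PySem.Chars.join [] (bits.take s)
      ++ (List.replicate (PySem.Int.floordiv rem L).toNat (PySem.Chars.join [] cycle)).flatten
      ++ PySem.Chars.join [] (cycle.take (PySem.Int.mod rem L).toNat))

-- ===== PRECONDITION & SPEC =====
-- Pre_ excludes (beyond seeds both programs raise on) positive-length requests for seeds with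
-- characters other than '0'/'1': whether A returns there or raises int(·,2)/int(·) ValueError
-- depends on which padded positions the stray characters occupy, a shape-dependent artefact
-- (B steps identically and agrees with A wherever A returns there, e.g. on the cited input).
def Pre_PRG (initial_seed : String) (output_len : Int) : Prop :=
  output_len ≤ 0 ∨ initial_seed.toList.all (fun c => c == '0' || c == '1') = true
instance (initial_seed : String) (output_len : Int) : Decidable (Pre_PRG initial_seed output_len) := by
  unfold Pre_PRG; infer_instance

def pvWitness_PRG : String × Int := ("0110", 3)

def Spec_PRG (initial_seed : String) (output_len : Int) (out : String) : Prop := out = PRG_alt initial_seed output_len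
instance (initial_seed : String) (output_len : Int) (out : String) : Decidable (Spec_PRG initial_seed output_len out) := by unfold Spec_PRG; infer_instance

-- ===== CLAIM (what is proved, stated in full; the proofs are below) =====
def Claim_equal_PRG : Prop := ∀ (initial_seed : String) (output_len : Int), Dom_PRG initial_seed output_len → Pre_PRG initial_seed output_len → Spec_PRG initial_seed output_len (PRG initial_seed output_len)

-- ===== LEMMAS AND PROOFS =====

-- the one-round step of the state, and the bit it emits
def pvNextS (ss : List Char) : List Char :=
  (pvFuncH (ss.take (ss.length / 2)) (ss.drop (ss.length / 2))).1
def pvBitS (ss : List Char) : List Char :=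
  (pvFuncH (ss.take (ss.length / 2)) (ss.drop (ss.length / 2))).2
-- the first n emitted bits from initial state s0
def pvBits (s0 : List Char) (n : Nat) : List (List Char) :=
  (List.range n).map (fun k => pvBitS (pvNextS^[k] s0))

-- A's fold body, named
def pvStepA (st : List Char × List Char) (_ : Nat) : List Char × List Char :=
  let x := st.1.length / 2
  let a := st.1.take x
  let b := st.1.drop x
  let fh := pvFuncH a b
  (fh.1, st.2 ++ fh.2)

theorem pvStepA_eq (st : List Char × List Char) (i : Nat) :
    pvStepA st i = (pvNextS st.1, st.2 ++ pvBitS st.1) := rfl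

theorem pvFoldA (n : Nat) (s : List Char) (acc : List Char) :
    (List.range n).foldl pvStepA (s, acc) = (pvNextS^[n] s, acc ++ (pvBits s n).flatten) := by
  induction n with
  | zero => simp [pvBits]
  | succ k ih =>
    rw [List.range_succ, List.foldl_append, ih, List.foldl_cons, List.foldl_nil, pvStepA_eq]
    simp [pvBits, List.range_succ, Function.iterate_succ_apply']

theorem pvJoin_flatten (parts : List (List Char)) :
    PySem.Chars.join [] parts = parts.flatten := by
  unfold PySem.Chars.join
  induction parts with
  | nil => simp [List.intercalate]
  | cons x t ih =>
    cases t with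
    | nil => simp [List.intercalate]
    | cons y w =>
      simp only [List.intercalate, List.intersperse] at *
      simp_all

-- the while loop: it either exhausts the fuel or stops at a state already in seen
theorem pvLoopB_spec (s0 : List Char) : ∀ (f i : Nat) (seen : PySem.Dict (List Char) Nat),
    (∀ k v, seen.get? k = some v → v < i ∧ pvNextS^[v] s0 = k) →
    ∃ m seen', i ≤ m ∧ m ≤ i + f ∧
      pvLoopB f (pvNextS^[i] s0) seen i (pvBits s0 i) = (pvBits s0 m, pvNextS^[m] s0, seen', m) ∧
      (∀ k v, seen'.get? k = some v → v < m ∧ pvNextS^[v] s0 = k) ∧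
      (m < i + f → (seen'.get? (pvNextS^[m] s0)).isSome = true) := by
  intro f
  induction f with
  | zero =>
    intro i seen hinv
    exact ⟨i, seen, le_refl i, by omega, rfl, hinv, by omega⟩
  | succ f ih =>
    intro i seen hinv
    by_cases hs : (seen.get? (pvNextS^[i] s0)).isSome = true
    · refine ⟨i, seen, le_refl i, by omega, ?_, hinv, fun _ => hs⟩
      simp [pvLoopB, hs]
    · have hinv' : ∀ k v, (seen.insert (pvNextS^[i] s0) i).get? k = some v →
          v < i + 1 ∧ pvNextS^[v] s0 = k := by
        intro k v hk
        rw [PySem.Dict.get?_insert] at hk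
        split at hk
        · rename_i hki
          cases hk
          exact ⟨by omega, hki.symm⟩
        · have := hinv k v hk
          exact ⟨by omega, this.2⟩
      obtain ⟨m, seen', hm1, hm2, heq, hinv2, hsome⟩ := ih (i + 1) _ hinv'
      refine ⟨m, seen', by omega, by omega, ?_, hinv2, fun h => hsome (by omega)⟩
      rw [show pvLoopB (f + 1) (pvNextS^[i] s0) seen i (pvBits s0 i)
            = pvLoopB f (pvNextS (pvNextS^[i] s0)) (seen.insert (pvNextS^[i] s0) i) (i + 1)
                (pvBits s0 i ++ [pvBitS (pvNextS^[i] s0)]) from by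
        simp only [pvLoopB, hs]
        rfl]
      rw [show pvBits s0 i ++ [pvBitS (pvNextS^[i] s0)] = pvBits s0 (i + 1) from by
            simp [pvBits, List.range_succ],
          show pvNextS (pvNextS^[i] s0) = pvNextS^[i + 1] s0 from
            (Function.iterate_succ_apply' pvNextS i s0).symm]
      exact heq

-- periodicity: if the state at s + L equals the state at s, the tail is L-periodic
theorem pvIt_per (s0 : List Char) (s L : Nat) (hL : pvNextS^[s + L] s0 = pvNextS^[s] s0)
    (d : Nat) : pvNextS^[s + L + d] s0 = pvNextS^[s + d] s0 := by
  rw [show s + L + d = d + (s + L) by omega, Function.iterate_add_apply, hL,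
    ← Function.iterate_add_apply, show d + s = s + d by omega]

-- tiling an L-periodic sequence
theorem pvTile {α : Type} (F : Nat → α) (L : Nat) (hper : ∀ t, F (L + t) = F t) (q : Nat) :
    ∀ r, (List.range (q * L + r)).map F
      = (List.replicate q ((List.range L).map F)).flatten ++ (List.range r).map F := by
  induction q with
  | zero => simp
  | succ q ih =>
    intro r
    rw [show (q + 1) * L + r = L + (q * L + r) by ring, List.range_add, List.map_append,
      List.map_map, show F ∘ (L + ·) = F from funext fun t => hper t, ih,
      List.replicate_succ, List.flatten_cons, List.append_assoc]

theorem pvFlattenRep {α : Type} (q : Nat) (l : List (List α)) :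
    ((List.replicate q l).flatten).flatten = (List.replicate q l.flatten).flatten := by
  induction q with
  | zero => rfl
  | succ q ih => simp [List.replicate_succ, ih]

-- the main equivalence, unconditionally at the level of the (total) ports
theorem pvMain (initial_seed : String) (output_len : Int) :
    PRG initial_seed output_len = PRG_alt initial_seed output_len := by
  unfold PRG PRG_alt
  dsimp only
  set s0 := PySem.Chars.zfill initial_seed.toList 32 with hs0
  set n' := output_len.toNat with hn'
  have hempty : ∀ (k : List Char) (v : Nat), (PySem.Dict.empty (κ := List Char) (ν := Nat)).get? k = some v →
      v < 0 ∧ pvNextS^[v] s0 = k := by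
    intro k v hk
    rw [PySem.Dict.get?_empty] at hk
    cases hk
  obtain ⟨m, seen', hm0, hmf, heq, hinv, hsome⟩ := pvLoopB_spec s0 n' 0 PySem.Dict.empty hempty
  simp only [Function.iterate_zero_apply] at heq
  rw [show pvBits s0 0 = [] from rfl] at heq
  rw [heq]
  have hA : (List.range n').foldl
      (fun (st : List Char × List Char) _ =>
        let x := st.1.length / 2
        let a := st.1.take x
        let b := st.1.drop x
        let fh := pvFuncH a b
        (fh.1, st.2 ++ fh.2)) (s0, []) = (pvNextS^[n'] s0, [] ++ (pvBits s0 n').flatten) :=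
    pvFoldA n' s0 []
  rw [hA]
  simp only [List.nil_append]
  by_cases hle : output_len ≤ (m : Int)
  · -- fuel exhausted: m = n'
    have hmn : m = n' := by
      have h1 : n' ≤ m := by
        rw [hn']
        exact Int.toNat_le.mpr hle
      omega
    rw [if_pos hle, pvJoin_flatten, hmn]
  · -- cycle found at step m < n'
    rw [if_neg hle]
    have hmlt : m < n' := by
      have : (m : Int) < output_len := by omega
      omega
    have hs : (seen'.get? (pvNextS^[m] s0)).isSome = true := hsome (by omega)
    obtain ⟨s, hgs⟩ := Option.isSome_iff_exists.mp hs
    obtain ⟨hsm, hits⟩ := hinv _ _ hgs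
    -- names for the periodic structure
    set L := m - s with hLdef
    have hLpos : 0 < L := by omega
    have hsL : s + L = m := by omega
    have hper0 : pvNextS^[s + L] s0 = pvNextS^[s] s0 := by rw [hsL, hits]
    set F : Nat → List Char := fun t => pvBitS (pvNextS^[s + t] s0) with hF
    have hperF : ∀ t, F (L + t) = F t := by
      intro t
      simp only [hF]
      rw [show s + (L + t) = s + L + t by omega, pvIt_per s0 s L hper0 t]
    -- bits = pvBits s0 m splits at s
    have hsplitm : pvBits s0 m = pvBits s0 s ++ (List.range L).map F := by
      rw [pvBits, show m = s + L by omega, List.range_add, List.map_append, List.map_map]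
      rfl
    have hlen_s : (pvBits s0 s).length = s := by simp [pvBits]
    have htake : (pvBits s0 m).take s = pvBits s0 s := by
      rw [hsplitm, List.take_append_of_le_length (by omega), List.take_of_length_le (by omega)]
    have hdrop : (pvBits s0 m).drop s = (List.range L).map F := by
      rw [hsplitm, List.drop_append_of_le_length (by omega), List.drop_of_length_le (by omega),
        List.nil_append]
    have hcyclen : ((pvBits s0 m).drop s).length = L := by
      rw [hdrop]; simp
    rw [hgs]
    simp only [Option.getD_some]
    -- arithmetic: rem and L as Nat casts
    have hout : output_len = (n' : Int) := by
      rw [hn']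
      omega
    have hrem : output_len - (s : Int) = ((n' - s : Nat) : Int) := by
      rw [hout]
      omega
    rw [hcyclen, hrem, PySem.Int.floordiv_natCast, PySem.Int.mod_natCast, Int.toNat_natCast,
      Int.toNat_natCast]
    set q := (n' - s) / L with hq
    set r := (n' - s) % L with hr
    have hrL : r < L := Nat.mod_lt _ hLpos
    have hqr : n' - s = q * L + r := by
      rw [hq, hr, Nat.mul_comm]
      exact (Nat.div_add_mod _ _).symm
    -- the whole output, at the list-of-bitstrings level
    have hsplitn : pvBits s0 n' = pvBits s0 s ++ (List.range (q * L + r)).map F := by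
      rw [pvBits, show n' = s + (q * L + r) by omega, List.range_add, List.map_append,
        List.map_map]
      rfl
    have htile := pvTile F L hperF q r
    have htaker : ((List.range L).map F).take r = (List.range r).map F := by
      have h1 : List.range L = List.range r ++ (List.range (L - r)).map (r + ·) := by
        rw [← List.range_add]
        congr 1
        omega
      rw [h1, List.map_append, List.take_append_of_le_length (by simp),
        List.take_of_length_le (by simp)]
    rw [hsplitn, htile, hdrop, htake, htaker, pvJoin_flatten, pvJoin_flatten, pvJoin_flatten]
    congr 1
    simp [List.flatten_append, pvFlattenRep, List.append_assoc]

-- ===== VERDICT (by name: the statement is the Claim_ definition above) =====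
theorem PRG_spec : Claim_equal_PRG := by
  intro initial_seed output_len _ _
  unfold Spec_PRG
  exact pvMain initial_seed output_len
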